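-- pv_equiv track=rewrite | github.com/ldearsley2/AoC2023 | day3/part1.py | valid_parts
-- ===== SOURCE A (Python) =====
-- def valid_parts(eng_numbers, sym_locations):
--     valid_numbers = []
--
--     for line, numbers in enumerate(eng_numbers):
--         valid = False
--
--         for number in numbers:
--             number_str = ""
--             for index, digit in number:
--                 number_str = number_str + digit
--
--                 if line != 0:
--                     for symbol in sym_locations[line-1]:
--                         if index-1 <= symbol <= index+1:
--                             valid = True
--
--                 for symbol in sym_locations[line]:
--                     if index-1 <= symbol <= index+1:
--                         valid = True
--
--                 if line != len(eng_numbers)-1: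
--                     for symbol in sym_locations[line+1]:
--                         if index-1 <= symbol <= index+1:
--                             valid = True
--
--             if valid:
--                 valid_numbers.append(number_str)
--                 number_str = ""
--                 valid = False
--
--     return valid_numbers
-- ===== SOURCE B (Python) =====
-- def valid_parts(eng_numbers, sym_locations):
--     n = len(eng_numbers)
--     result = []
--     for line, numbers in enumerate(eng_numbers):
--         syms = set(sym_locations[line])
--         if line > 0:
--             syms |= set(sym_locations[line - 1])
--         if line < n - 1:
--             syms |= set(sym_locations[line + 1])
--         for number in numbers:
--             cols = {i + d for i, _ in number for d in (-1, 0, 1)}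
--             if not cols.isdisjoint(syms):
--                 result.append("".join(d for _, d in number))
--     return result
-- ===== Notes on version B (the rewrite author's own statement) =====
-- stated objective: faster
-- what changed: Replaces A's per-digit rescans of up to three symbol rows (with a carried valid flag reset on append) by building the neighbouring-rows symbol set once per line and testing each number with one set-disjointness check against its covered-column set, joining the digits directly.
-- outside the precondition, e.g. on valid_parts([[]], []): A returns [], B raises IndexError
import Mathlib
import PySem

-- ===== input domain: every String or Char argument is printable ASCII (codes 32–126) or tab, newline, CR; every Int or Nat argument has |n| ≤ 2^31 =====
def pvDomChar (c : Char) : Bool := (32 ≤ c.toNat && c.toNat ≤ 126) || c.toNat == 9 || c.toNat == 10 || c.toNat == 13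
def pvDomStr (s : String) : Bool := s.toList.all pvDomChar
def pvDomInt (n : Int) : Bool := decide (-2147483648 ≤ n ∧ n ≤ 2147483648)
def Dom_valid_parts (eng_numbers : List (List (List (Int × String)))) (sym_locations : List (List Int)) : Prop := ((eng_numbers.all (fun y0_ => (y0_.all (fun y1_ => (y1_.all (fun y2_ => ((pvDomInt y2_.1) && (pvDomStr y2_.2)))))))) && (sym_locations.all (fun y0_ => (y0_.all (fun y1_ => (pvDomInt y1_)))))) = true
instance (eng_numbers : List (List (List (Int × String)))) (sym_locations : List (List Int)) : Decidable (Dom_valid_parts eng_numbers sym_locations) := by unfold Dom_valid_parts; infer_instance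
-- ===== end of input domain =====

-- B builds each line's neighbouring-rows symbol set once and tests each number by one
-- set-disjointness check against its covered-column set, instead of A's per-digit rescans
-- of up to three symbol rows with a carried flag; a timing run measured B faster.

-- ===== PORT A =====
-- sym_locations[i]; total form: inside Pre_ every access A performs is in range
def pvRow (sym_locations : List (List Int)) (i : Int) : List Int :=
  (PySem.List.pyGet? sym_locations i).getD []

-- 'for symbol in syms: if index-1 <= symbol <= index+1: valid = True'
def pvScan (index : Int) (valid : Bool) (syms : List Int) : Bool :=
  syms.foldl (fun v s => if index - 1 ≤ s ∧ s ≤ index + 1 then true else v) valid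

-- body of A's 'for index, digit in number' loop; state = (number_str, valid)
def pvDigitStep (sym_locations : List (List Int)) (n line : Int)
    (st : String × Bool) (p : Int × String) : String × Bool :=
  let number_str := st.1 ++ p.2
  let v1 := if line ≠ 0 then pvScan p.1 st.2 (pvRow sym_locations (line - 1)) else st.2
  let v2 := pvScan p.1 v1 (pvRow sym_locations line)
  let v3 := if line ≠ n - 1 then pvScan p.1 v2 (pvRow sym_locations (line + 1)) else v2
  (number_str, v3)

-- body of A's 'for number in numbers' loop; state = (valid_numbers, valid)
def pvNumberStep (sym_locations : List (List Int)) (n line : Int)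
    (st : List String × Bool) (number : List (Int × String)) : List String × Bool :=
  let r := number.foldl (pvDigitStep sym_locations n line) ("", st.2)
  if r.2 then (st.1 ++ [r.1], false) else (st.1, r.2)

def valid_parts (eng_numbers : List (List (List (Int × String)))) (sym_locations : List (List Int)) : List String :=
  let n : Int := eng_numbers.length
  (PySem.List.enumerate eng_numbers 0).foldl
    (fun acc p => (p.2.foldl (pvNumberStep sym_locations n p.1) (acc, false)).1) []

-- ===== PORT B =====
-- syms = set(sym_locations[line]); |= the neighbouring rows under the boundary guards
def pvLineSyms (sym_locations : List (List Int)) (n line : Int) : PySem.Set Int :=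
  let s0 := PySem.Set.ofList (pvRow sym_locations line)
  let s1 := if line > 0 then PySem.Set.union s0 (pvRow sym_locations (line - 1)) else s0
  if line < n - 1 then PySem.Set.union s1 (pvRow sym_locations (line + 1)) else s1

-- cols = {i + d for i, _ in number for d in (-1, 0, 1)}
def pvCovered (number : List (Int × String)) : PySem.Set Int :=
  PySem.Set.ofList (number.flatMap (fun q => [q.1 + -1, q.1 + 0, q.1 + 1]))

def valid_parts_alt (eng_numbers : List (List (List (Int × String)))) (sym_locations : List (List Int)) : List String :=
  let n : Int := eng_numbers.length
  (PySem.List.enumerate eng_numbers 0).foldl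
    (fun result p =>
      let syms := pvLineSyms sym_locations n p.1
      p.2.foldl
        (fun result number =>
          if !(PySem.Set.isdisjoint (pvCovered number) syms)
          then result ++ [PySem.Str.join "" (number.map (·.2))]
          else result)
        result)
    []

-- ===== PRECONDITION & SPEC =====
-- Pre_ excludes inputs where sym_locations is shorter than eng_numbers: there Python A
-- raises IndexError on any line holding a digit, and on the remaining (all-lines-empty)
-- shapes A returns [] while B, which builds the symbol set for every line, itself raises.
def Pre_valid_parts (eng_numbers : List (List (List (Int × String)))) (sym_locations : List (List Int)) : Prop :=
  eng_numbers.length ≤ sym_locations.length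
instance (eng_numbers : List (List (List (Int × String)))) (sym_locations : List (List Int)) : Decidable (Pre_valid_parts eng_numbers sym_locations) := by unfold Pre_valid_parts; infer_instance

def pvWitness_valid_parts : (List (List (List (Int × String)))) × List (List Int) :=
  ([[[(0, "4"), (1, "2")]]], [[1]])

def Spec_valid_parts (eng_numbers : List (List (List (Int × String)))) (sym_locations : List (List Int)) (out : List String) : Prop := out = valid_parts_alt eng_numbers sym_locations
instance (eng_numbers : List (List (List (Int × String)))) (sym_locations : List (List Int)) (out : List String) : Decidable (Spec_valid_parts eng_numbers sym_locations out) := by unfold Spec_valid_parts; infer_instance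

-- ===== CLAIM (what is proved, stated in full; the proofs are below) =====
def Claim_equal_valid_parts : Prop := ∀ (eng_numbers : List (List (List (Int × String)))) (sym_locations : List (List Int)), Dom_valid_parts eng_numbers sym_locations → Pre_valid_parts eng_numbers sym_locations → Spec_valid_parts eng_numbers sym_locations (valid_parts eng_numbers sym_locations)

-- ===== LEMMAS AND PROOFS =====

theorem pv_inter_nil (xss : List (List Char)) : List.intercalate ([] : List Char) xss = xss.flatten := by
  induction xss with
  | nil => rfl
  | cons x xs ih =>
    cases xs with
    | nil => simp [List.intercalate]
    | cons y ys => simp_all [List.intercalate, List.intersperse]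

theorem pv_join_cons (d : String) (ds : List String) :
    PySem.Str.join "" (d :: ds) = d ++ PySem.Str.join "" ds := by
  rw [← String.toList_inj]
  simp [PySem.Str.toList_join, PySem.Chars.join, pv_inter_nil]

theorem pv_foldl_ifTrue {α : Type} (p : α → Prop) [DecidablePred p] (xs : List α) (v : Bool) :
    xs.foldl (fun v x => if p x then true else v) v = (v || xs.any (fun x => decide (p x))) := by
  induction xs generalizing v with
  | nil => simp
  | cons x xs ih => rw [List.foldl_cons, ih]; by_cases h : p x <;> simp [h]

theorem pvScan_eq (index : Int) (valid : Bool) (syms : List Int) :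
    pvScan index valid syms
      = (valid || syms.any (fun s => decide (index - 1 ≤ s ∧ s ≤ index + 1))) :=
  pv_foldl_ifTrue (fun s => index - 1 ≤ s ∧ s ≤ index + 1) syms valid

-- adjacency test of A for one digit at column i on line `line`
def pvAdj (sym_locations : List (List Int)) (n line i : Int) : Bool :=
  ((if line ≠ 0 then (pvRow sym_locations (line - 1)).any (fun s => decide (i - 1 ≤ s ∧ s ≤ i + 1)) else false)
    || (pvRow sym_locations line).any (fun s => decide (i - 1 ≤ s ∧ s ≤ i + 1)))
    || (if line ≠ n - 1 then (pvRow sym_locations (line + 1)).any (fun s => decide (i - 1 ≤ s ∧ s ≤ i + 1)) else false)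

theorem pvDigitStep_eq (sym_locations : List (List Int)) (n line : Int)
    (s0 : String) (v0 : Bool) (q : Int × String) :
    pvDigitStep sym_locations n line (s0, v0) q
      = (s0 ++ q.2, v0 || pvAdj sym_locations n line q.1) := by
  simp only [pvDigitStep, pvScan_eq, pvAdj]
  rw [Prod.mk.injEq]
  refine ⟨rfl, ?_⟩
  split_ifs <;>
    (rw [Bool.eq_iff_iff]; simp only [Bool.or_eq_true, Bool.false_or, Bool.or_false]; try tauto)

theorem pvDigitFold (sym_locations : List (List Int)) (n line : Int)
    (number : List (Int × String)) (s0 : String) (v0 : Bool) :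
    number.foldl (pvDigitStep sym_locations n line) (s0, v0)
      = (s0 ++ PySem.Str.join "" (number.map (·.2)),
         v0 || number.any (fun q => pvAdj sym_locations n line q.1)) := by
  induction number generalizing s0 v0 with
  | nil => simp [show PySem.Str.join "" ([] : List String) = "" from rfl]
  | cons q qs ih =>
    rw [List.foldl_cons, pvDigitStep_eq, ih, Prod.mk.injEq]
    refine ⟨?_, ?_⟩
    · rw [List.map_cons, pv_join_cons, String.append_assoc]
    · simp [List.any_cons, Bool.or_assoc]

theorem pv_mem_lineSyms (sym_locations : List (List Int)) (n line : Int)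
    (h0 : 0 ≤ line) (h1 : line ≤ n - 1) (x : Int) :
    x ∈ pvLineSyms sym_locations n line ↔
      ((line ≠ 0 ∧ x ∈ pvRow sym_locations (line - 1)) ∨ x ∈ pvRow sym_locations line
        ∨ (line ≠ n - 1 ∧ x ∈ pvRow sym_locations (line + 1))) := by
  by_cases g1 : line > 0 <;> by_cases g2 : line < n - 1
  · have e1 : line ≠ 0 := by omega
    have e2 : line ≠ n - 1 := by omega
    simp only [pvLineSyms, if_pos g1, if_pos g2, PySem.Set.mem_union, PySem.Set.mem_ofList,
      e1, e2, ne_eq, not_false_iff, true_and]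
    try tauto
  · have e1 : line ≠ 0 := by omega
    have e2 : ¬ line ≠ n - 1 := by omega
    simp only [pvLineSyms, if_pos g1, if_neg g2, PySem.Set.mem_union, PySem.Set.mem_ofList,
      e1, e2, ne_eq, not_false_iff, true_and, false_and, or_false]
    try tauto
  · have e1 : ¬ line ≠ 0 := by omega
    have e2 : line ≠ n - 1 := by omega
    simp only [pvLineSyms, if_neg g1, if_pos g2, PySem.Set.mem_union, PySem.Set.mem_ofList,
      e1, e2, ne_eq, not_false_iff, true_and, false_and, false_or]
    try tauto
  · have e1 : ¬ line ≠ 0 := by omega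
    have e2 : ¬ line ≠ n - 1 := by omega
    simp only [pvLineSyms, if_neg g1, if_neg g2, PySem.Set.mem_union, PySem.Set.mem_ofList,
      e1, e2, ne_eq, not_false_iff, true_and, false_and, false_or, or_false]

theorem pv_exists_or3 {D1 D2 D3 R : Int → Prop} :
    (∃ s, (D1 s ∨ D2 s ∨ D3 s) ∧ R s)
      ↔ (∃ s, D1 s ∧ R s) ∨ (∃ s, D2 s ∧ R s) ∨ (∃ s, D3 s ∧ R s) := by
  constructor
  · rintro ⟨s, (h | h | h), hr⟩
    exacts [Or.inl ⟨s, h, hr⟩, Or.inr (Or.inl ⟨s, h, hr⟩), Or.inr (Or.inr ⟨s, h, hr⟩)]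
  · rintro (⟨s, h, hr⟩ | ⟨s, h, hr⟩ | ⟨s, h, hr⟩)
    exacts [⟨s, Or.inl h, hr⟩, ⟨s, Or.inr (Or.inl h), hr⟩, ⟨s, Or.inr (Or.inr h), hr⟩]

theorem pvAdj_iff (sym_locations : List (List Int)) (n line : Int)
    (h0 : 0 ≤ line) (h1 : line ≤ n - 1) (i : Int) :
    pvAdj sym_locations n line i = true
      ↔ ∃ s, s ∈ pvLineSyms sym_locations n line ∧ (i - 1 ≤ s ∧ s ≤ i + 1) := by
  simp only [pv_mem_lineSyms sym_locations n line h0 h1]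
  rw [pv_exists_or3]
  by_cases g1 : line ≠ 0 <;> by_cases g2 : line ≠ n - 1
  all_goals
    simp only [pvAdj, if_pos, if_neg, g1, g2, Bool.or_eq_true, List.any_eq_true,
      decide_eq_true_eq, Bool.false_eq_true, ne_eq, not_false_iff, true_and,
      false_and, exists_false, false_or, or_false]
  all_goals exact or_assoc

theorem pv_cols_link (number : List (Int × String)) (S : Int → Prop) :
    (∃ q, q ∈ number ∧ ∃ s, S s ∧ (q.1 - 1 ≤ s ∧ s ≤ q.1 + 1))
      ↔ (∃ x, (∃ q, q ∈ number ∧ (x = q.1 + -1 ∨ x = q.1 + 0 ∨ x = q.1 + 1)) ∧ S x) := by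
  constructor
  · rintro ⟨q, hq, s, hS, h1, h2⟩
    exact ⟨s, ⟨q, hq, by omega⟩, hS⟩
  · rintro ⟨x, ⟨q, hq, hx⟩, hS⟩
    exact ⟨q, hq, x, hS, by omega⟩

theorem pvCond_eq (sym_locations : List (List Int)) (n line : Int)
    (h0 : 0 ≤ line) (h1 : line ≤ n - 1) (number : List (Int × String)) :
    number.any (fun q => pvAdj sym_locations n line q.1)
      = !(PySem.Set.isdisjoint (pvCovered number) (pvLineSyms sym_locations n line)) := by
  rw [Bool.eq_iff_iff, Bool.not_eq_true', Bool.eq_false_iff, Ne, PySem.Set.isdisjoint_iff]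
  simp only [List.any_eq_true, pvAdj_iff sym_locations n line h0 h1, not_forall, not_not,
    exists_prop, pvCovered, PySem.Set.mem_ofList, List.mem_flatMap, List.mem_cons,
    List.not_mem_nil, or_false]
  exact pv_cols_link number _

theorem pvLineFold (sym_locations : List (List Int)) (n line : Int)
    (h0 : 0 ≤ line) (h1 : line ≤ n - 1)
    (numbers : List (List (Int × String))) (acc : List String) :
    (numbers.foldl (pvNumberStep sym_locations n line) (acc, false)).1
      = numbers.foldl
          (fun result number =>
            if !(PySem.Set.isdisjoint (pvCovered number) (pvLineSyms sym_locations n line))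
            then result ++ [PySem.Str.join "" (number.map (·.2))]
            else result)
          acc := by
  induction numbers generalizing acc with
  | nil => rfl
  | cons number rest ih =>
    simp only [List.foldl_cons]
    rw [show pvNumberStep sym_locations n line (acc, false) number
          = (if !(PySem.Set.isdisjoint (pvCovered number) (pvLineSyms sym_locations n line))
             then acc ++ [PySem.Str.join "" (number.map (·.2))] else acc, false) from ?_]
    · exact ih _
    · simp only [pvNumberStep, pvDigitFold, Bool.false_or,
        pvCond_eq sym_locations n line h0 h1]
      split_ifs with h <;> simp_all

-- ===== VERDICT (by name: the statement is the Claim_ definition above) =====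
theorem valid_parts_spec : Claim_equal_valid_parts := by
  intro eng sym _ _
  unfold Spec_valid_parts valid_parts valid_parts_alt
  apply PySem.List.foldl_congr_mem
  intro acc p hp
  rw [PySem.List.mem_enumerate_iff] at hp
  obtain ⟨k, hk, rfl⟩ := hp
  exact pvLineFold sym eng.length (0 + k) (by omega) (by omega) _ acc
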